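-- pv_equiv track=rewrite | github.com/Relnan/sims4-make-god | mg_main.py | _parse_args_and_debug
-- ===== SOURCE A (Python) =====
-- def _parse_args_and_debug(args):
--     args_list = [str(a).lower().strip() for a in args]
--     force_debug_level = None
--
--     while args_list and args_list[-1] in ['debug', 'debug_all']:
--         val = args_list.pop()
--         if val == 'debug' and not force_debug_level:
--             force_debug_level = 'normal'
--         elif val == 'debug_all':
--             force_debug_level = 'all'
--
--     return args_list, force_debug_level
-- ===== SOURCE B (Python) =====
-- def _parse_args_and_debug(args):
--     args_list = [str(a).lower().strip() for a in args]
--     m = 0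
--     n = len(args_list)
--     while m < n and args_list[n - 1 - m] in ('debug', 'debug_all'):
--         m += 1
--     k = n - m
--     kept = args_list[:k]
--     suffix = args_list[k:]
--     if not suffix:
--         level = None
--     elif 'debug_all' in suffix:
--         level = 'all'
--     else:
--         level = 'normal'
--     return kept, level
-- ===== Notes on version B (the rewrite author's own statement) =====
-- stated objective: simpler
-- what changed: Replaces the stateful pop-and-update loop (which mutates the list and threads a level accumulator with falsy-precedence rules) by boundary-finding (count trailing debug tokens), one slice, and a closed-form classification of the suffix (None / 'all' if it contains 'debug_all' / 'normal').
import Mathlib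
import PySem

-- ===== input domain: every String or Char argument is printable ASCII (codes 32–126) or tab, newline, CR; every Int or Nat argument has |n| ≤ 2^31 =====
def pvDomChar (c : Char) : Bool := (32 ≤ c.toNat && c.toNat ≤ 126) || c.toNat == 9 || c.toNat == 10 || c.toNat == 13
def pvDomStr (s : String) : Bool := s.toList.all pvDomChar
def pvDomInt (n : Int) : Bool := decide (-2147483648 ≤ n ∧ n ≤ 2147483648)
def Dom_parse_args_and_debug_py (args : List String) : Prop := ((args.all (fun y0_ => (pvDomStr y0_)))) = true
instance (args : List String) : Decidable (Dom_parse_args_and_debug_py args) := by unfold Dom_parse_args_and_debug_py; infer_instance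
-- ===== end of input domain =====

-- B replaces A's stateful pop-and-update loop by boundary-finding plus a closed-form
-- classification of the trailing debug suffix; same return value, objective: simpler.

-- ===== PORT A =====
-- Python truthiness of the Optional[str] accumulator: None and "" are falsy.
def pvFalsyA (lvl : Option String) : Bool :=
  match lvl with
  | none => true
  | some s => s == ""

-- one iteration's update of force_debug_level (the if/elif in A's loop body)
def pvUpdA (lvl : Option String) (v : String) : Option String :=
  if v = "debug" ∧ pvFalsyA lvl then some "normal"
  else if v = "debug_all" then some "all"
  else lvl

-- the while loop: pop from the end while the last element is 'debug'/'debug_all'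
def pvLoopA (lst : List String) (lvl : Option String) : List String × Option String :=
  match h : lst.getLast? with
  | none => (lst, lvl)
  | some v =>
    if v = "debug" ∨ v = "debug_all" then
      pvLoopA lst.dropLast (pvUpdA lvl v)
    else (lst, lvl)
termination_by lst.length
decreasing_by
  have hne : lst ≠ [] := by rintro rfl; simp at h
  have := List.length_pos_of_ne_nil hne
  simp [List.length_dropLast]; omega

def parse_args_and_debug_py (args : List String) : List String × Option String :=
  pvLoopA (args.map (fun a => PySem.Str.strip (PySem.Str.lower a))) none

-- ===== PORT B =====
def pvIsDbg (v : String) : Bool := v == "debug" || v == "debug_all"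

-- B's boundary scan: count of trailing debug tokens
def pvCountB (lst : List String) (m : Nat) : Nat :=
  if m < lst.length ∧ pvIsDbg (lst.getD (lst.length - 1 - m) "") then
    pvCountB lst (m + 1)
  else m
termination_by lst.length - m
decreasing_by omega

def parse_args_and_debug_py_alt (args : List String) : List String × Option String :=
  let lst := args.map (fun a => PySem.Str.strip (PySem.Str.lower a))
  let m := pvCountB lst 0
  let k := lst.length - m
  let kept := lst.take k
  let suffix := lst.drop k
  let level : Option String :=
    if suffix.isEmpty then none
    else if suffix.contains "debug_all" then some "all"
    else some "normal"
  (kept, level)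

-- ===== PRECONDITION & SPEC =====
def Spec_parse_args_and_debug_py (args : List String) (out : List String × Option String) : Prop := out = parse_args_and_debug_py_alt args
instance (args : List String) (out : List String × Option String) : Decidable (Spec_parse_args_and_debug_py args out) := by unfold Spec_parse_args_and_debug_py; infer_instance

-- ===== CLAIM (what is proved, stated in full; the proofs are below) =====
def Claim_equal_parse_args_and_debug_py : Prop := ∀ (args : List String), Dom_parse_args_and_debug_py args → Spec_parse_args_and_debug_py args (parse_args_and_debug_py args)

-- ===== LEMMAS AND PROOFS =====

theorem pvLoopA_nil (lvl : Option String) : pvLoopA [] lvl = ([], lvl) := by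
  unfold pvLoopA; rfl

theorem pvLoopA_concat (ys : List String) (v : String) (lvl : Option String) :
    pvLoopA (ys ++ [v]) lvl =
      if v = "debug" ∨ v = "debug_all" then pvLoopA ys (pvUpdA lvl v)
      else (ys ++ [v], lvl) := by
  rw [pvLoopA]
  split
  · next h => simp [List.getLast?_concat] at h
  · next v' h =>
      have hv : v' = v := by simpa [List.getLast?_concat] using h.symm
      subst hv
      simp [List.dropLast_concat]

-- A's loop, expressed over the reversed list: strip the debug prefix of the reverse,
-- folding the level update over the popped tokens in pop order.
theorem pvLoopA_rev (r : List String) (lvl : Option String) :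
    pvLoopA r.reverse lvl =
      ((r.dropWhile pvIsDbg).reverse, (r.takeWhile pvIsDbg).foldl pvUpdA lvl) := by
  induction r generalizing lvl with
  | nil => simp [pvLoopA_nil]
  | cons v r ih =>
    have : (v :: r).reverse = r.reverse ++ [v] := by simp
    rw [this, pvLoopA_concat]
    by_cases hv : v = "debug" ∨ v = "debug_all"
    · have hb : pvIsDbg v = true := by
        rcases hv with h | h <;> simp [pvIsDbg, h]
      simp [hv, ih, List.dropWhile_cons, List.takeWhile_cons, hb, List.foldl_cons]
    · have hb : pvIsDbg v = false := by
        simp [pvIsDbg]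
        constructor <;> (intro h; exact hv (by simp [h]))
      simp [hv, List.dropWhile_cons, List.takeWhile_cons, hb]

-- B's scan counts the takeWhile-length of the reversed list.
theorem pvCountB_spec (lst : List String) (m : Nat) :
    pvCountB lst m = m + ((lst.reverse.drop m).takeWhile pvIsDbg).length := by
  induction m using pvCountB.induct lst with
  | case1 m h ih =>
    obtain ⟨hm, hd⟩ := h
    have hmr : m < lst.reverse.length := by simpa using hm
    have hget : lst.getD (lst.length - 1 - m) "" = lst.reverse[m]'hmr := by
      rw [List.getElem_reverse]
      rw [List.getD_eq_getElem]
    have hdrop : lst.reverse.drop m = lst.reverse[m]'hmr :: lst.reverse.drop (m + 1) :=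
      List.drop_eq_getElem_cons hmr
    have hd2 : pvIsDbg (lst.reverse[m]'hmr) = true := by rw [← hget]; exact hd
    rw [pvCountB, if_pos ⟨hm, hd⟩, ih, hdrop, List.takeWhile_cons, if_pos hd2]
    simp only [List.length_cons]
    omega
  | case2 m h =>
    rw [pvCountB]
    rw [if_neg h]
    rcases Nat.lt_or_ge m lst.length with hm | hm
    · have hmr : m < lst.reverse.length := by simpa using hm
      have hd : pvIsDbg (lst.getD (lst.length - 1 - m) "") = false := by
        by_contra hc
        exact h ⟨hm, by simpa using (Bool.of_not_eq_false hc)⟩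
      have hget : lst.getD (lst.length - 1 - m) "" = lst.reverse[m]'hmr := by
        rw [List.getElem_reverse]; rw [List.getD_eq_getElem]
      rw [hget] at hd
      have hdrop : lst.reverse.drop m = lst.reverse[m]'hmr :: lst.reverse.drop (m + 1) :=
        List.drop_eq_getElem_cons hmr
      rw [hdrop, List.takeWhile_cons, hd]
      simp
    · have : lst.reverse.drop m = [] := by
        apply List.drop_eq_nil_of_le; simpa using hm
      simp [this]

-- the level fold, starting from an already-set (truthy) level
theorem pvFold_some (t : List String) (x : String) (hx : x ≠ "")
    (ht : ∀ v ∈ t, pvIsDbg v = true) :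
    t.foldl pvUpdA (some x) = if "debug_all" ∈ t then some "all" else some x := by
  induction t generalizing x with
  | nil => simp
  | cons v t ih =>
    have hv := ht v (by simp)
    have hfx : pvFalsyA (some x) = false := by simp [pvFalsyA, hx]
    rcases (by simpa [pvIsDbg] using hv : v = "debug" ∨ v = "debug_all") with h | h
    · subst h
      have : "debug_all" ∈ ("debug" :: t) ↔ "debug_all" ∈ t := by simp
      rw [List.foldl_cons]
      have hupd : pvUpdA (some x) "debug" = some x := by
        simp [pvUpdA, hfx]
      rw [hupd, ih x hx (fun v hv => ht v (by simp [hv]))]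
      simp
    · subst h
      rw [List.foldl_cons]
      have hupd : pvUpdA (some x) "debug_all" = some "all" := by
        simp [pvUpdA, pvFalsyA, hx]
      rw [hupd, ih "all" (by decide) (fun v hv => ht v (by simp [hv]))]
      simp
-- the level fold from None equals B's closed-form classification
theorem pvFold_none (t : List String) (ht : ∀ v ∈ t, pvIsDbg v = true) :
    t.foldl pvUpdA none =
      if t = [] then none else if "debug_all" ∈ t then some "all" else some "normal" := by
  cases t with
  | nil => simp
  | cons v t =>
    have hv := ht v (by simp)
    rcases (by simpa [pvIsDbg] using hv : v = "debug" ∨ v = "debug_all") with h | h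
    · subst h
      rw [List.foldl_cons]
      have hupd : pvUpdA none "debug" = some "normal" := by simp [pvUpdA, pvFalsyA]
      rw [hupd, pvFold_some t "normal" (by decide) (fun v hv => ht v (by simp [hv]))]
      simp
    · subst h
      rw [List.foldl_cons]
      have hupd : pvUpdA none "debug_all" = some "all" := by simp [pvUpdA, pvFalsyA]
      rw [hupd, pvFold_some t "all" (by decide) (fun v hv => ht v (by simp [hv]))]
      simp

-- ===== VERDICT (by name: the statement is the Claim_ definition above) =====
theorem parse_args_and_debug_py_spec : Claim_equal_parse_args_and_debug_py := by
  intro args _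
  unfold Spec_parse_args_and_debug_py parse_args_and_debug_py parse_args_and_debug_py_alt
  set lst := args.map (fun a => PySem.Str.strip (PySem.Str.lower a)) with hlst
  set r := lst.reverse with hr
  set t := r.takeWhile pvIsDbg with htw
  set d := r.dropWhile pvIsDbg with hdw
  have hsplit : r = t ++ d := (List.takeWhile_append_dropWhile (p := pvIsDbg) (l := r)).symm
  have hlst2 : lst = d.reverse ++ t.reverse := by
    have : lst = r.reverse := by simp [hr]
    rw [this, hsplit, List.reverse_append]
  have hm : pvCountB lst 0 = t.length := by
    rw [pvCountB_spec]; simp [← hr, htw]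
  have h1 : lst.length = d.length + t.length := by
    rw [hlst2]; simp
  have hk : lst.length - pvCountB lst 0 = d.reverse.length := by
    rw [hm]; simp only [List.length_reverse]; omega
  have htake : lst.take (lst.length - pvCountB lst 0) = d.reverse := by
    rw [hk, hlst2, List.take_left]
  have hdrop : lst.drop (lst.length - pvCountB lst 0) = t.reverse := by
    rw [hk, hlst2, List.drop_left]
  have hA : pvLoopA lst none = (d.reverse, t.foldl pvUpdA none) := by
    have : lst = r.reverse := by simp [hr]
    rw [this, pvLoopA_rev, ← htw, ← hdw]
  have ht : ∀ v ∈ t, pvIsDbg v = true := fun v hv => List.mem_takeWhile_imp (htw ▸ hv)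
  rw [hA]
  simp only [htake, hdrop]
  rw [pvFold_none t ht]
  by_cases h0 : t = []
  · simp [h0]
  · have hne : t.reverse ≠ [] := by simpa using h0
    by_cases hm2 : "debug_all" ∈ t <;>
      simp [h0, hne, hm2, List.isEmpty_iff, List.contains_iff_mem]
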